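-- pv_equiv track=rewrite | github.com/poojithayadavalli/codekata | even sort algorithm.py | evensort
-- ===== SOURCE A (Python) =====
-- def evensort(length,l):
--   if(length==1):
--     return l[0]
--   else:
--     t=[]
--     for i in range(0,len(l)):
--       if((i+1)%2==0):
--         t.append(l[i])
--     return evensort(len(t),t)
-- ===== SOURCE B (Python) =====
-- def evensort(length, l):
--     if length == 1:
--         return l[0]
--     # survivor of repeated keep-even-positions filtering: index 2^floor(log2(n)) - 1
--     return l[(1 << (len(l).bit_length() - 1)) - 1]
-- ===== Notes on version B (the rewrite author's own statement) =====
-- stated objective: faster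
-- what changed: Replaced the recursive keep-even-positions filtering with a single O(1) closed-form index l[2**floor(log2(len(l)))-1] computed via bit_length.
-- outside the precondition, e.g. on evensort(3, [5]): A does not finish within the time limit, B returns 5; on evensort(1, []): A raises IndexError, B raises IndexError
import Mathlib
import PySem

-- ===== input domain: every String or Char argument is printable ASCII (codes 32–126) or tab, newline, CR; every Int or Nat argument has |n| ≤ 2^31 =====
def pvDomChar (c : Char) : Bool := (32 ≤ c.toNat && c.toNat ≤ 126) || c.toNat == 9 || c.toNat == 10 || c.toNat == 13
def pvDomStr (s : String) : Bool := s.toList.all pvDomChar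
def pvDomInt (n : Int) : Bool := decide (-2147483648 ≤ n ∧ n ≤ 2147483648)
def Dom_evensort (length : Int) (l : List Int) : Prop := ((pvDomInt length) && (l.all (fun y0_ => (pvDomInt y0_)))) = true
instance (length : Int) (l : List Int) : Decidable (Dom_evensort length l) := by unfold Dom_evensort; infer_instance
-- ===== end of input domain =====

-- B replaces A's recursive keep-even-positions filtering by the closed-form index l[2^floor(log2 n) - 1] (objective: faster).

-- ===== PORT A =====
-- fuel = recursion depth bound; l.length + 1 always suffices since the list at least halves each call.
def evensortGo (fuel : Nat) (length : Int) (l : List Int) : Int :=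
  match fuel with
  | 0 => 0  -- unreachable inside Pre_ (Python recurses forever outside Pre_)
  | fuel + 1 =>
    if length = 1 then
      PySem.List.pyGetD l 0 0   -- l[0]; in range under Pre_
    else
      let t := (PySem.List.pyRange 0 (l.length : Int) 1).foldl
        (fun t i => if PySem.Int.mod (i + 1) 2 = 0 then t ++ [PySem.List.pyGetD l i 0] else t) []
      evensortGo fuel (t.length : Int) t

def evensort (length : Int) (l : List Int) : Int :=
  evensortGo (l.length + 1) length l

-- ===== PORT B =====
-- 1 <<< (bitLength - 1) is Python's 1 << (len(l).bit_length() - 1); exact for l.length ≥ 1 (guaranteed by Pre_).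
def evensort_alt (length : Int) (l : List Int) : Int :=
  if length = 1 then
    PySem.List.pyGetD l 0 0
  else
    PySem.List.pyGetD l (((1 <<< (PySem.Int.bitLength (l.length : Int) - 1) : Nat) : Int) - 1) 0

-- ===== PRECONDITION & SPEC =====
-- Pre_ excludes exactly the inputs on which Python A does not return: length==1 with empty l raises
-- IndexError, and length≠1 with fewer than 2 elements recurses forever (RecursionError).
def Pre_evensort (length : Int) (l : List Int) : Prop :=
  (length = 1 ∧ l ≠ []) ∨ (length ≠ 1 ∧ 2 ≤ l.length)
instance (length : Int) (l : List Int) : Decidable (Pre_evensort length l) := by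
  unfold Pre_evensort; infer_instance

def pvWitness_evensort : Int × List Int := (4, [1, 2, 3, 4])

def Spec_evensort (length : Int) (l : List Int) (out : Int) : Prop := out = evensort_alt length l
instance (length : Int) (l : List Int) (out : Int) : Decidable (Spec_evensort length l out) := by unfold Spec_evensort; infer_instance

-- ===== CLAIM (what is proved, stated in full; the proofs are below) =====
def Claim_equal_evensort : Prop := ∀ (length : Int) (l : List Int), Dom_evensort length l → Pre_evensort length l → Spec_evensort length l (evensort length l)

-- ===== LEMMAS AND PROOFS =====

-- the elements of l at odd (0-based) indices: what one pass of A's filter keeps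
def oddIdx : List Int → List Int
  | [] => []
  | [_] => []
  | _ :: b :: rest => b :: oddIdx rest

theorem length_oddIdx (l : List Int) : (oddIdx l).length = l.length / 2 := by
  induction l using oddIdx.induct <;> simp [oddIdx] <;> omega

theorem getElem?_oddIdx (l : List Int) (k : Nat) : (oddIdx l)[k]? = l[2 * k + 1]? := by
  induction l using oddIdx.induct generalizing k with
  | case1 => simp [oddIdx]
  | case2 x => simp [oddIdx]
  | case3 a b rest ih =>
    cases k with
    | zero => simp [oddIdx]
    | succ k => simpa [oddIdx, Nat.mul_succ, Nat.add_assoc] using ih k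

-- A's index loop, started at any even offset s into the remaining list, keeps the odd positions
theorem loop_gen (l : List Int) : ∀ (s : Int), PySem.Int.mod s 2 = 0 → ∀ (acc : List Int),
    (PySem.List.pyRange s (s + l.length) 1).foldl
      (fun t i => if PySem.Int.mod (i + 1) 2 = 0 then t ++ [PySem.List.pyGetD l (i - s) 0] else t) acc
    = acc ++ oddIdx l := by
  induction l using oddIdx.induct with
  | case1 =>
    intro s hs acc
    simp [oddIdx]
  | case2 x =>
    intro s hs acc
    have hmod : PySem.Int.mod (s + 1) 2 ≠ 0 := by
      rw [PySem.Int.mod_eq_emod_of_pos (by norm_num)] at hs ⊢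
      omega
    rw [show s + ([x] : List Int).length = s + 1 by simp]
    rw [PySem.List.pyRange_one_cons (by omega), PySem.List.pyRange_one_eq_nil (by omega)]
    simp only [List.foldl_cons, List.foldl_nil, if_neg hmod, oddIdx, List.append_nil]
  | case3 a b rest ih =>
    intro s hs acc
    have h2 : PySem.Int.mod (s + 2) 2 = 0 := by
      rw [PySem.Int.mod_eq_emod_of_pos (by norm_num)] at hs ⊢
      omega
    have hm1 : PySem.Int.mod (s + 1) 2 ≠ 0 := by
      rw [PySem.Int.mod_eq_emod_of_pos (by norm_num)] at hs ⊢; omega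
    have hm2 : PySem.Int.mod (s + 1 + 1) 2 = 0 := by
      rw [PySem.Int.mod_eq_emod_of_pos (by norm_num)] at hs ⊢; omega
    have hlen : s + ((a :: b :: rest : List Int).length : Int) = s + 2 + rest.length := by
      simp; omega
    rw [hlen, PySem.List.pyRange_one_cons (by omega), PySem.List.pyRange_one_cons (by omega)]
    simp only [List.foldl_cons, if_neg hm1, if_pos hm2]
    have hget : PySem.List.pyGetD (a :: b :: rest) (s + 1 - s) 0 = b := by
      rw [show s + 1 - s = (1:Int) by ring]
      simp [PySem.List.pyGetD_ofNat']
    rw [hget]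
    have hcongr : ∀ (t : List Int), ∀ i ∈ PySem.List.pyRange (s + 1 + 1) (s + 2 + rest.length),
        (if PySem.Int.mod (i + 1) 2 = 0 then t ++ [PySem.List.pyGetD (a :: b :: rest) (i - s) 0] else t)
        = (if PySem.Int.mod (i + 1) 2 = 0 then t ++ [PySem.List.pyGetD rest (i - (s + 2)) 0] else t) := by
      intro t i hi
      rw [PySem.List.mem_pyRange_one] at hi
      have hg : PySem.List.pyGetD (a :: b :: rest) (i - s) 0 = PySem.List.pyGetD rest (i - (s + 2)) 0 := by
        rw [PySem.List.pyGetD_eq_getElem _ _ (by omega) (by omega),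
            PySem.List.pyGetD_eq_getElem _ _ (by omega) (by omega)]
        have h1 : (i - s).toNat = (i - (s + 2)).toNat + 2 := by omega
        simp [h1]
      rw [hg]
    rw [PySem.List.foldl_congr_mem _ _ _ _ hcongr]
    rw [show s + 1 + 1 = s + 2 by ring]
    rw [ih (s + 2) h2 (acc ++ [b])]
    simp [oddIdx]

theorem loop_eq_oddIdx (l : List Int) :
    (PySem.List.pyRange 0 (l.length : Int) 1).foldl
      (fun t i => if PySem.Int.mod (i + 1) 2 = 0 then t ++ [PySem.List.pyGetD l i 0] else t) []
    = oddIdx l := by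
  simpa using loop_gen l 0 (by decide) []

theorem log2_rec (n : Nat) (h : 2 ≤ n) : Nat.log2 n = Nat.log2 (n / 2) + 1 := by
  simp only [Nat.log2_eq_log_two]
  rw [Nat.log_div_base]
  have := Nat.log_pos (by norm_num : 1 < 2) h
  omega

theorem bitLength_eq_log2 (n : Nat) (h : 1 ≤ n) :
    PySem.Int.bitLength (n : Int) = Nat.log2 n + 1 := by
  induction n using Nat.strong_induction_on with
  | _ n ih =>
    rcases Nat.lt_or_ge n 2 with h2 | h2
    · interval_cases n
      · decide
    · rw [PySem.Int.bitLength_natCast (by omega : 0 < n), ih (n / 2) (by omega) (by omega),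
          log2_rec n h2]

theorem go_closed (fuel : Nat) :
    ∀ (l : List Int), 2 ≤ l.length → l.length ≤ fuel → ∀ length : Int, length ≠ 1 →
      evensortGo fuel length l = l.getD (2 ^ Nat.log2 l.length - 1) 0 := by
  induction fuel with
  | zero => intro l h1 h2; omega
  | succ fuel ih =>
    intro l h1 h2 length hlen
    rw [evensortGo, if_neg hlen]
    simp only [loop_eq_oddIdx]
    have hlog : Nat.log2 l.length = Nat.log2 (l.length / 2) + 1 := log2_rec _ h1
    have hlt : (oddIdx l).length = l.length / 2 := length_oddIdx l
    rcases Nat.lt_or_ge (l.length / 2) 2 with hc | hc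
    · -- l.length ∈ {2,3}: one filtering pass leaves a single element, l[1]
      have ht1 : (oddIdx l).length = 1 := by omega
      obtain ⟨f, rfl⟩ : ∃ f, fuel = f + 1 := ⟨fuel - 1, by omega⟩
      rw [ht1, evensortGo, if_pos (by norm_num)]
      have hlog1 : Nat.log2 l.length = 1 := by
        rw [hlog, show l.length / 2 = 1 by omega]; decide
      rw [hlog1, PySem.List.pyGetD_zero]
      rw [List.getD_eq_getElem?_getD, List.getD_eq_getElem?_getD, getElem?_oddIdx]
      norm_num
    · have hne : ((oddIdx l).length : Int) ≠ 1 := by rw [hlt]; omega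
      rw [ih _ (by omega) (by omega) _ hne, hlt]
      rw [List.getD_eq_getElem?_getD, List.getD_eq_getElem?_getD, getElem?_oddIdx]
      congr 2
      rw [hlog]
      have : 1 ≤ 2 ^ Nat.log2 (l.length / 2) := Nat.one_le_two_pow
      rw [pow_succ]
      omega

-- ===== VERDICT (by name: the statement is the Claim_ definition above) =====
theorem evensort_spec : Claim_equal_evensort := by
  intro length l _hdom hpre
  unfold Spec_evensort evensort evensort_alt
  by_cases hl : length = 1
  · subst hl
    rw [evensortGo, if_pos rfl, if_pos rfl]
  · rcases hpre with ⟨h1, _⟩ | ⟨_, h2⟩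
    · exact absurd h1 hl
    · rw [if_neg hl, go_closed (l.length + 1) l h2 (by omega) length hl]
      rw [bitLength_eq_log2 l.length (by omega)]
      have hpow : 1 ≤ 2 ^ Nat.log2 l.length := Nat.one_le_two_pow
      have hcast : ((1 <<< (Nat.log2 l.length + 1 - 1) : Nat) : Int) - 1
          = ((2 ^ Nat.log2 l.length - 1 : Nat) : Int) := by
        rw [Nat.one_shiftLeft]
        push_cast [hpow]
        ring
      rw [hcast, PySem.List.pyGetD_natCast]
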